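-- pv_equiv track=rewrite | github.com/jsgoller1/algorithms | elements-of-programming-interviews/2025/epi_judge_python/replace_and_remove.py | delete_b
-- ===== SOURCE A (Python) =====
-- def delete_b(size, s):
--     i = j = 0
--     while j < size:
--         if s[j] == 'b':
--             s[j] = ''
--         else:
--             s[i] = s[j]
--             i += 1
--         j += 1
--     return i-1
-- ===== SOURCE B (Python) =====
-- # B: pure single counting pass -- no two-pointer compaction, no mutation of s
-- # (equivalence is about the RETURN value only: A overwrites s in place, B does not mutate s).
-- def delete_b(size, s):
--     return sum(1 for j in range(size) if s[j] != 'b') - 1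
-- ===== Notes on version B (the rewrite author's own statement) =====
-- stated objective: simpler
-- what changed: A's in-place two-pointer compaction with element writes is replaced by a pure one-pass count of non-'b' elements minus one (no mutation, no write pointer).
import Mathlib
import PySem

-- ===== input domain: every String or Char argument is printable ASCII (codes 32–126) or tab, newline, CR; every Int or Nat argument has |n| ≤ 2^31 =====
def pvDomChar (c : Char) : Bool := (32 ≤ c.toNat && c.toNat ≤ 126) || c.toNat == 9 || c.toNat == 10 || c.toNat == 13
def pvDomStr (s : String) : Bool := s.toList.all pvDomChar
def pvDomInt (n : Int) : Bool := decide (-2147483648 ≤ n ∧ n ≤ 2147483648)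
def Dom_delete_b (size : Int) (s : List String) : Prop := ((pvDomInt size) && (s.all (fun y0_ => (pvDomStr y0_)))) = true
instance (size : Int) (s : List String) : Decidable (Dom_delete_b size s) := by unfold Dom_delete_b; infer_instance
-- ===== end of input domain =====

-- B replaces A's in-place two-pointer compaction by a pure one-pass count of non-'b' elements
-- minus one (objective: simpler). A mutates s in place and B does not; the equivalence proved
-- here is about the RETURN value only.

-- ===== PORT A =====
-- while j < size: read s[j] (pyGetD: in range under Pre_), write via pySetD; state (i, current list)
def delete_b (size : Int) (s : List String) : Int :=
  let st :=
    (PySem.List.pyRange 0 size 1).foldl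
      (fun (st : Int × List String) j =>
        let i := st.1
        let t := st.2
        if PySem.List.pyGetD t j "" = "b" then
          (i, PySem.List.pySetD t j "")
        else
          (i + 1, PySem.List.pySetD t i (PySem.List.pyGetD t j "")))
      (0, s)
  st.1 - 1

-- ===== PORT B =====
-- sum(1 for j in range(size) if s[j] != 'b') - 1
def delete_b_alt (size : Int) (s : List String) : Int :=
  (PySem.List.pyRange 0 size 1).foldl
    (fun acc j => if PySem.List.pyGetD s j "" ≠ "b" then acc + 1 else acc) 0 - 1

-- ===== PRECONDITION & SPEC =====
-- A (and B) raise IndexError as soon as the loop index reaches len(s), i.e. whenever size > len(s).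
def Pre_delete_b (size : Int) (s : List String) : Prop := size ≤ (s.length : Int)
instance (size : Int) (s : List String) : Decidable (Pre_delete_b size s) := by
  unfold Pre_delete_b; infer_instance

def pvWitness_delete_b : Int × List String := (3, ["a", "b", "c"])

def Spec_delete_b (size : Int) (s : List String) (out : Int) : Prop := out = delete_b_alt size s
instance (size : Int) (s : List String) (out : Int) : Decidable (Spec_delete_b size s out) := by
  unfold Spec_delete_b; infer_instance

-- ===== CLAIM (what is proved, stated in full; the proofs are below) =====
def Claim_equal_delete_b : Prop := ∀ (size : Int) (s : List String), Dom_delete_b size s → Pre_delete_b size s → Spec_delete_b size s (delete_b size s)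

-- ===== LEMMAS AND PROOFS =====

-- Loop invariant: starting A's fold at index a with write pointer i and a working list t that
-- still agrees with the original s on all indices in [a, size), the first component of A's
-- final state equals B's counting fold started at i.
theorem loop_sim (size : Int) (s : List String) :
    ∀ (n : Nat) (a i : Int) (t : List String),
      (size - a).toNat = n →
      0 ≤ i → i ≤ a →
      t.length = s.length →
      size ≤ (s.length : Int) →
      (∀ j : Int, a ≤ j → j < size →
        PySem.List.pyGetD t j "" = PySem.List.pyGetD s j "") →
      ((PySem.List.pyRange a size 1).foldl
        (fun (st : Int × List String) j =>
          let i := st.1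
          let t := st.2
          if PySem.List.pyGetD t j "" = "b" then
            (i, PySem.List.pySetD t j "")
          else
            (i + 1, PySem.List.pySetD t i (PySem.List.pyGetD t j "")))
        (i, t)).1
      = (PySem.List.pyRange a size 1).foldl
          (fun acc j => if PySem.List.pyGetD s j "" ≠ "b" then acc + 1 else acc) i := by
  intro n
  induction n with
  | zero =>
    intro a i t hn _ _ _ _ _
    have hba : size ≤ a := by omega
    rw [PySem.List.pyRange_one_eq_nil hba]
    simp [List.foldl]
  | succ m ih =>
    intro a i t hn hi0 hia hlen hsz hagree
    have hab : a < size := by omega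
    have ha0 : 0 ≤ a := by omega
    rw [PySem.List.pyRange_one_cons hab]
    simp only [List.foldl_cons]
    have hread : PySem.List.pyGetD t a "" = PySem.List.pyGetD s a "" :=
      hagree a le_rfl hab
    -- index facts
    have haS : a < (s.length : Int) := lt_of_lt_of_le hab hsz
    have haT : a < (t.length : Int) := by rw [hlen]; exact haS
    -- agreement is preserved by a write at an index < a + 1
    have hpres : ∀ (w : Int) (v : String), 0 ≤ w → w < a + 1 →
        ∀ j : Int, a + 1 ≤ j → j < size →
          PySem.List.pyGetD (PySem.List.pySetD t w v) j "" = PySem.List.pyGetD s j "" := by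
      intro w v hw0 hwlt j hj1 hj2
      have hj0 : 0 ≤ j := by omega
      have hjT : j < (t.length : Int) := by rw [hlen]; exact lt_of_lt_of_le hj2 hsz
      rw [PySem.List.pySetD_of_nonneg _ _ hw0,
          PySem.List.pyGetD_eq_getElem _ _ hj0 (by simpa using hjT),
          List.getElem_set_ne (by omega)]
      have h := hagree j (by omega) hj2
      rw [PySem.List.pyGetD_eq_getElem _ _ hj0 (by simpa using hjT),
          PySem.List.pyGetD_eq_getElem _ _ hj0 (by rw [hlen] at hjT; simpa using hjT)] at h
      rw [PySem.List.pyGetD_eq_getElem _ _ hj0 (by rw [hlen] at hjT; simpa using hjT)]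
      exact h
    by_cases hb : PySem.List.pyGetD t a "" = "b"
    · -- 'b' case: write '' at index a, i unchanged
      rw [if_pos hb]
      have hB : ¬ PySem.List.pyGetD s a "" ≠ "b" := by rw [← hread]; simpa using hb
      rw [if_neg hB]
      exact ih (a + 1) i (PySem.List.pySetD t a "") (by omega) hi0 (by omega)
        (by rw [PySem.List.length_pySetD]; exact hlen) hsz
        (hpres a "" ha0 (by omega))
    · -- non-'b' case: write s[a] at index i, i increments
      rw [if_neg hb]
      have hB : PySem.List.pyGetD s a "" ≠ "b" := by rw [← hread]; exact hb
      rw [if_pos hB]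
      exact ih (a + 1) (i + 1) (PySem.List.pySetD t i (PySem.List.pyGetD t a ""))
        (by omega) (by omega) (by omega)
        (by rw [PySem.List.length_pySetD]; exact hlen) hsz
        (hpres i _ hi0 (by omega))

-- ===== VERDICT (by name: the statement is the Claim_ definition above) =====
theorem delete_b_spec : Claim_equal_delete_b := by
  intro size s _ hpre
  unfold Spec_delete_b delete_b delete_b_alt
  have h := loop_sim size s (size - 0).toNat 0 0 s rfl le_rfl le_rfl rfl hpre
    (fun j _ _ => rfl)
  simpa using h
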